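-- pv_equiv track=rewrite | github.com/yuvrajverma25/HackSquad2023-sangwan | Python/TilingProblem.py | count_ways_to_tile
-- ===== SOURCE A (Python) =====
-- def count_ways_to_tile(n):
--     if n <= 2:
--         return n
--
--     dp = [0] * (n + 1)
--     dp[1] = 1
--     dp[2] = 2
--
--     for i in range(3, n + 1):
--         dp[i] = dp[i - 1] + dp[i - 2]
--
--     return dp[n]
-- ===== SOURCE B (Python) =====
-- def count_ways_to_tile(n):
--     if n <= 2:
--         return n
--
--     def fib_pair(k):
--         # (F(k), F(k+1)) with F(0)=0, F(1)=1, by fast doubling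
--         if k == 0:
--             return (0, 1)
--         a, b = fib_pair(k // 2)
--         c = a * (2 * b - a)
--         d = a * a + b * b
--         if k % 2 == 0:
--             return (c, d)
--         else:
--             return (d, c + d)
--
--     return fib_pair(n + 1)[0]
-- ===== Notes on version B (the rewrite author's own statement) =====
-- stated objective: faster
-- what changed: Replaces the O(n) DP-table Fibonacci loop with an O(log n) fast-doubling recursion (no table at all).
import Mathlib
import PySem

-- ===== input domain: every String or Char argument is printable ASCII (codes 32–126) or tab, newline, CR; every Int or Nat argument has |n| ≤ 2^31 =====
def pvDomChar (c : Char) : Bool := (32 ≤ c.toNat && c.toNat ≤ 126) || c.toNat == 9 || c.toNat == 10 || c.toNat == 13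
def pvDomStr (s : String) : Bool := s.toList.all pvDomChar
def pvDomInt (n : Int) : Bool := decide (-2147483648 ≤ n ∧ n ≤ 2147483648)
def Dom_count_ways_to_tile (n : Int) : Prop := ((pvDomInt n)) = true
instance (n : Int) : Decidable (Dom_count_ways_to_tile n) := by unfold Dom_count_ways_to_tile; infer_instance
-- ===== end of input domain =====

-- B replaces A's O(n) DP-table loop with an O(log n) fast-doubling Fibonacci recursion (objective: faster).

-- ===== PORT A =====
-- the body of A's for-loop: dp[i] = dp[i-1] + dp[i-2]
def pvStepA (dp : List Int) (i : Int) : List Int :=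
  PySem.List.pySetD dp i (PySem.List.pyGetD dp (i-1) 0 + PySem.List.pyGetD dp (i-2) 0)

def count_ways_to_tile (n : Int) : Int :=
  if n ≤ 2 then n
  else
    let dp := PySem.List.pyRepeat [(0 : Int)] (n + 1)
    let dp := PySem.List.pySetD dp 1 1
    let dp := PySem.List.pySetD dp 2 2
    let dp := (PySem.List.pyRange 3 (n + 1) 1).foldl pvStepA dp
    PySem.List.pyGetD dp n 0

-- ===== PORT B =====
-- (F(k), F(k+1)) by fast doubling, as in Source B's fib_pair
def pvFibPair (k : Nat) : Int × Int :=
  if h : k = 0 then (0, 1)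
  else
    let p := pvFibPair (k / 2)
    let c := p.1 * (2 * p.2 - p.1)
    let d := p.1 * p.1 + p.2 * p.2
    if k % 2 = 0 then (c, d) else (d, c + d)
termination_by k
decreasing_by exact Nat.div_lt_self (Nat.pos_of_ne_zero h) one_lt_two

def count_ways_to_tile_alt (n : Int) : Int :=
  if n ≤ 2 then n
  else (pvFibPair (n + 1).toNat).1

-- ===== PRECONDITION & SPEC =====
def Spec_count_ways_to_tile (n : Int) (out : Int) : Prop := out = count_ways_to_tile_alt n
instance (n : Int) (out : Int) : Decidable (Spec_count_ways_to_tile n out) := by unfold Spec_count_ways_to_tile; infer_instance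

-- ===== CLAIM (what is proved, stated in full; the proofs are below) =====
def Claim_equal_count_ways_to_tile : Prop := ∀ (n : Int), Dom_count_ways_to_tile n → Spec_count_ways_to_tile n (count_ways_to_tile n)

-- ===== LEMMAS AND PROOFS =====

-- B computes Fibonacci
theorem pvFibPair_eq (k : Nat) : pvFibPair k = ((Nat.fib k : Int), (Nat.fib (k+1) : Int)) := by
  induction k using Nat.strong_induction_on with
  | _ k ih =>
    rw [pvFibPair]
    by_cases h : k = 0
    · simp [h]
    · simp only [h, dif_neg, not_false_iff]
      rw [ih (k / 2) (Nat.div_lt_self (Nat.pos_of_ne_zero h) one_lt_two)]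
      rcases Nat.even_or_odd k with he | ho
      · obtain ⟨m, hm⟩ := he
        have hm2 : k = 2 * m := by omega
        have hdiv : k / 2 = m := by omega
        have hmod : k % 2 = 0 := by omega
        subst hm2
        have hle : Nat.fib m ≤ 2 * Nat.fib (m + 1) :=
          le_trans (Nat.fib_le_fib_succ) (by omega)
        have hc : (Nat.fib (2 * m) : Int)
            = (Nat.fib m : Int) * (2 * (Nat.fib (m+1) : Int) - (Nat.fib m : Int)) := by
          rw [Nat.fib_two_mul]
          push_cast [Nat.cast_sub hle]
          ring
        have hd : (Nat.fib (2 * m + 1) : Int)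
            = (Nat.fib m : Int) * (Nat.fib m : Int) + (Nat.fib (m+1) : Int) * (Nat.fib (m+1) : Int) := by
          rw [Nat.fib_two_mul_add_one]
          push_cast
          ring
        rw [hdiv, if_pos hmod]
        simp only [Prod.mk.injEq]
        exact ⟨hc.symm, hd.symm⟩
      · obtain ⟨m, hm⟩ := ho
        have hdiv : k / 2 = m := by omega
        have hmod : k % 2 = 1 := by omega
        subst hm
        have hle : Nat.fib m ≤ 2 * Nat.fib (m + 1) :=
          le_trans (Nat.fib_le_fib_succ) (by omega)
        have hc : (Nat.fib (2 * m) : Int)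
            = (Nat.fib m : Int) * (2 * (Nat.fib (m+1) : Int) - (Nat.fib m : Int)) := by
          rw [Nat.fib_two_mul]
          push_cast [Nat.cast_sub hle]
          ring
        have hd : (Nat.fib (2 * m + 1) : Int)
            = (Nat.fib m : Int) * (Nat.fib m : Int) + (Nat.fib (m+1) : Int) * (Nat.fib (m+1) : Int) := by
          rw [Nat.fib_two_mul_add_one]
          push_cast
          ring
        have hsum : (Nat.fib (2 * m + 1 + 1) : Int)
            = (Nat.fib (2 * m) : Int) + (Nat.fib (2 * m + 1) : Int) := by
          rw [show 2 * m + 1 + 1 = 2 * m + 2 from by ring, Nat.fib_add_two]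
          push_cast
          ring
        rw [hdiv, if_neg (by omega)]
        simp only [Prod.mk.injEq]
        refine ⟨hd.symm, ?_⟩
        rw [hsum, hc, hd]

-- the contents of A's dp table once indices < m have been filled in
def pvDP (N m : Nat) : List Int :=
  (List.range (N+1)).map (fun j => if 1 ≤ j ∧ j < m then (Nat.fib (j+1) : Int) else 0)

theorem pvDP_getD (N m j : Nat) (hj : j < N + 1) :
    (pvDP N m).getD j 0 = if 1 ≤ j ∧ j < m then (Nat.fib (j+1) : Int) else 0 := by
  rw [List.getD_eq_getElem _ _ (by simpa [pvDP] using hj)]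
  simp [pvDP]

theorem pvStepA_pvDP (N m : Nat) (h3 : 3 ≤ m) (hm : m ≤ N) :
    pvStepA (pvDP N m) (m : Int) = pvDP N (m + 1) := by
  have h1 : ((m : Int) - 1) = ((m - 1 : Nat) : Int) := by omega
  have h2 : ((m : Int) - 2) = ((m - 2 : Nat) : Int) := by omega
  unfold pvStepA
  rw [h1, h2, PySem.List.pyGetD_natCast, PySem.List.pyGetD_natCast,
      PySem.List.pySetD_natCast,
      pvDP_getD N m (m-1) (by omega), pvDP_getD N m (m-2) (by omega)]
  rw [if_pos (by omega), if_pos (by omega)]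
  have hfib : (Nat.fib (m - 1 + 1) : Int) + (Nat.fib (m - 2 + 1) : Int) = (Nat.fib (m + 1) : Int) := by
    rw [show m + 1 = (m - 2 + 1) + 2 from by omega, Nat.fib_add_two,
        show m - 2 + 1 + 1 = m - 1 + 1 from by omega]
    push_cast
    ring
  rw [hfib]
  apply List.ext_getElem
  · simp [pvDP]
  · intro j hja hjb
    have hjN : j < N + 1 := by simpa [pvDP] using hjb
    by_cases hmj : m = j
    · subst hmj
      simp only [pvDP, List.getElem_set, List.getElem_map, List.getElem_range]
      simp
      omega
    · simp only [pvDP, List.getElem_set, List.getElem_map, List.getElem_range, if_neg hmj]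
      split_ifs with hA hB hB <;> first | rfl | omega

theorem pv_fold (N : Nat) :
    ∀ k : Nat, 3 + k ≤ N + 1 →
      (PySem.List.pyRange 3 (3 + (k : Int)) 1).foldl pvStepA (pvDP N 3) = pvDP N (3 + k) := by
  intro k
  induction k with
  | zero =>
    intro _
    simp [PySem.List.pyRange_one_eq_nil]
  | succ k ih =>
    intro hk
    have hsplit : PySem.List.pyRange 3 (3 + ((k : Int) + 1)) 1
        = PySem.List.pyRange 3 (3 + (k : Int)) 1 ++ [3 + (k : Int)] := by
      have := PySem.List.pyRange_one_succ_right (a := 3) (b := 3 + (k : Int)) (by omega)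
      rw [show (3 : Int) + ((k : Int) + 1) = (3 + (k : Int)) + 1 from by ring]
      exact this
    push_cast
    rw [hsplit, List.foldl_append, ih (by omega)]
    simp only [List.foldl_cons, List.foldl_nil]
    have : (3 : Int) + (k : Int) = ((3 + k : Nat) : Int) := by push_cast; ring
    rw [this, pvStepA_pvDP N (3 + k) (by omega) (by omega)]
    congr 1

-- the initial table [0]*(n+1) with dp[1]=1, dp[2]=2 is pvDP N 3
theorem pv_init (N : Nat) (hN : 3 ≤ N) :
    PySem.List.pySetD (PySem.List.pySetD (PySem.List.pyRepeat [(0 : Int)] ((N : Int) + 1)) 1 1) 2 2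
      = pvDP N 3 := by
  rw [PySem.List.pyRepeat_singleton]
  have htn : (((N : Int) + 1)).toNat = N + 1 := by omega
  rw [htn]
  rw [show (1 : Int) = ((1 : Nat) : Int) from rfl, show (2 : Int) = ((2 : Nat) : Int) from rfl,
      PySem.List.pySetD_natCast, PySem.List.pySetD_natCast]
  have hf2 : Nat.fib 2 = 1 := by decide
  have hf3 : Nat.fib 3 = 2 := by decide
  apply List.ext_getElem
  · simp [pvDP]
  · intro j hja hjb
    have hjN : j < N + 1 := by simpa using hja
    by_cases h2 : j = 2
    · subst h2
      simp [pvDP, hf3]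
    · by_cases h1 : j = 1
      · subst h1
        simp [pvDP, hf2]
      · simp only [pvDP, List.getElem_set, List.getElem_map, List.getElem_range,
          List.getElem_replicate]
        rw [if_neg (by omega), if_neg (by omega), if_neg (by omega)]

theorem pv_A_eq (N : Nat) (hN : 3 ≤ N) :
    count_ways_to_tile (N : Int) = (Nat.fib (N + 1) : Int) := by
  unfold count_ways_to_tile
  rw [if_neg (by omega)]
  simp only
  rw [pv_init N hN]
  have hk : ((N : Int) + 1) = 3 + ((N - 2 : Nat) : Int) := by omega
  rw [hk, pv_fold N (N - 2) (by omega)]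
  rw [PySem.List.pyGetD_natCast, pvDP_getD N (3 + (N - 2)) N (by omega)]
  rw [if_pos (by omega)]

-- ===== VERDICT (by name: the statement is the Claim_ definition above) =====
theorem count_ways_to_tile_spec : Claim_equal_count_ways_to_tile := by
  intro n _
  unfold Spec_count_ways_to_tile
  by_cases h : n ≤ 2
  · unfold count_ways_to_tile count_ways_to_tile_alt
    rw [if_pos h, if_pos h]
  · have hN : n = ((n.toNat : Nat) : Int) := by omega
    have h3 : 3 ≤ n.toNat := by omega
    rw [hN, pv_A_eq n.toNat h3]
    unfold count_ways_to_tile_alt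
    rw [if_neg (by omega)]
    have : (((n.toNat : Nat) : Int) + 1).toNat = n.toNat + 1 := by omega
    rw [this, pvFibPair_eq]
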